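-- pv_equiv track=rewrite | github.com/minji0320/Algorithm_Study | Programmers/Greedy/조이스틱.py | solution
-- ===== SOURCE A (Python) =====
-- def solution(name):
--     # 상하 조작 횟수 구하기
--     answer = 0
--     for i in name:
--         if i < "N":
--             answer += ord(i) - ord("A")
--         else:
--             answer += ord("Z") - ord(i) + 1
--
--     # 좌우 조작 횟수 구하기
--     n = len(name)
--     left_count = 0
--     right_count = 0
--     half_left_count = 0
--     half_right_count = 0
--     for i in range(1, n):
--         if name[i] != "A":
--             left_count = i
--             if i <= n // 2:
--                 half_left_count = i
--
--         if name[-i] != "A":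
--             right_count = i
--             if i <= n // 2:
--                 half_right_count = i
--
--     answer += min(left_count, right_count,
--                   half_left_count * 2 + half_right_count,
--                   half_left_count + half_right_count * 2)
--     return answer
-- ===== SOURCE B (Python) =====
-- def solution(name):
--     # vertical cost: per-character closed form
--     vertical = sum(min(ord(c) - 65, 91 - ord(c)) for c in name)
--     # horizontal cost: read the four boundary quantities off slices via strip,
--     # no index loop at all
--     n = len(name)
--     half = n // 2
--     left = len(name[1:].rstrip('A'))
--     right = len(name[1:].lstrip('A'))
--     half_left = len(name[1:half + 1].rstrip('A'))
--     half_right = len(name[n - half:].lstrip('A'))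
--     return vertical + min(left, right,
--                           2 * half_left + half_right,
--                           half_left + 2 * half_right)
-- ===== Notes on version B (the rewrite author's own statement) =====
-- stated objective: alternative
-- what changed: A's single mutable four-counter index loop (with negative mirror indexing) disappears entirely: B computes the vertical cost as a per-character closed-form min and reads the four horizontal quantities directly as lengths of lstrip/rstrip of three slices (name[1:], name[1:n//2+1], name[n-n//2:]), so B contains no index loop at all.
import Mathlib
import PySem

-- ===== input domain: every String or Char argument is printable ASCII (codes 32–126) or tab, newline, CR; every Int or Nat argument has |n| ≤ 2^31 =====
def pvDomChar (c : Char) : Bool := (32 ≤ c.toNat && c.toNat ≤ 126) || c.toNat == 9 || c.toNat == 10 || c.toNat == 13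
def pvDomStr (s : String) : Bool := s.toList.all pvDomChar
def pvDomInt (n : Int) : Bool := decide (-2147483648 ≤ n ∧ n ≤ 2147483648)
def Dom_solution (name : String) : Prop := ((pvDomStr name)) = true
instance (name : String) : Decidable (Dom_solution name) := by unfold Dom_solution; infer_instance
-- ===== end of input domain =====

-- B removes A's mutable four-counter index loop entirely: it reads the four
-- horizontal quantities as lengths of lstrip/rstrip of three slices and takes the
-- vertical cost as a per-character min; objective: alternative decomposition.

-- ===== PORT A =====
-- loop body of A's `for i in range(1, n)` (the four counters as a tuple)
def stepA (name : String) (n : Int) (st : Int × Int × Int × Int) (i : Int) :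
    Int × Int × Int × Int :=
  let l := if PySem.Str.pyGet? name i ≠ some 'A' then i else st.1
  let hl := if PySem.Str.pyGet? name i ≠ some 'A' then
              (if i ≤ PySem.Int.floordiv n 2 then i else st.2.2.1) else st.2.2.1
  let r := if PySem.Str.pyGet? name (-i) ≠ some 'A' then i else st.2.1
  let hr := if PySem.Str.pyGet? name (-i) ≠ some 'A' then
              (if i ≤ PySem.Int.floordiv n 2 then i else st.2.2.2) else st.2.2.2
  (l, r, hl, hr)

def solution (name : String) : Int :=
  let answer : Int := name.toList.foldl (fun acc i =>
      if i < 'N' then acc + ((i.toNat : Int) - ('A'.toNat : Int))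
      else acc + (('Z'.toNat : Int) - (i.toNat : Int) + 1)) 0
  let n : Int := PySem.Str.len name
  let st := (PySem.List.pyRange 1 n 1).foldl (stepA name n) (0, 0, 0, 0)
  answer + min (min (min st.1 st.2.1) (st.2.2.1 * 2 + st.2.2.2))
               (st.2.2.1 + st.2.2.2 * 2)

-- ===== PORT B =====
-- hand ports of Python's  s.rstrip('A')  /  s.lstrip('A')  (exact: they remove
-- exactly the maximal trailing / leading run of 'A')
def rstripA (cs : List Char) : List Char := (cs.reverse.dropWhile (fun c => c == 'A')).reverse
def lstripA (cs : List Char) : List Char := cs.dropWhile (fun c => c == 'A')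

def solution_alt (name : String) : Int :=
  let vertical : Int := name.toList.foldl (fun acc c =>
      acc + min ((c.toNat : Int) - 65) (91 - (c.toNat : Int))) 0
  let n : Int := PySem.Str.len name
  let half : Int := PySem.Int.floordiv n 2
  let left : Int := (rstripA (PySem.List.slice name.toList (some 1) none)).length
  let right : Int := (lstripA (PySem.List.slice name.toList (some 1) none)).length
  let halfLeft : Int := (rstripA (PySem.List.slice name.toList (some 1) (some (half + 1)))).length
  let halfRight : Int := (lstripA (PySem.List.slice name.toList (some (n - half)) none)).length
  vertical + min (min (min left right) (2 * halfLeft + halfRight)) (halfLeft + 2 * halfRight)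

-- ===== PRECONDITION & SPEC =====
def Spec_solution (name : String) (out : Int) : Prop := out = solution_alt name
instance (name : String) (out : Int) : Decidable (Spec_solution name out) := by unfold Spec_solution; infer_instance

-- ===== CLAIM (what is proved, stated in full; the proofs are below) =====
def Claim_equal_solution : Prop := ∀ (name : String), Dom_solution name → Spec_solution name (solution name)

-- ===== LEMMAS AND PROOFS =====

theorem pyGet_neg_aux (s : List Char) (j : Int) (h1 : 1 ≤ j) (h2 : j < (s.length : Int)) :
    PySem.List.pyGet? s (-(((s.length : Int)) - j)) = PySem.List.pyGet? s j := by
  have hk : ((s.length : Int) - j) = ((((s.length : Int) - j).toNat : Nat) : Int) := by omega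
  rw [hk, PySem.List.pyGet?_neg_natCast _ _ (by omega) (by omega)]
  rw [PySem.List.pyGet?_of_nonneg s (show (0:Int) ≤ j by omega)]
  have hidx : s.length - ((s.length : Int) - j).toNat = j.toNat := by omega
  rw [hidx]

theorem pyRange_maprev (n : Int) :
    (PySem.List.pyRange 1 n 1).map (fun j => n - j) = (PySem.List.pyRange 1 n 1).reverse := by
  have h := PySem.List.pyRange_neg_one_eq_reverse (n - 1) 0
  have e1 : (0 : Int) + 1 = 1 := by ring
  have e2 : n - 1 + 1 = n := by ring
  rw [e1, e2] at h
  rw [← h, PySem.List.pyRange_neg_one, PySem.List.pyRange_one, List.map_map]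
  have e3 : n - 1 - 0 = n - 1 := by ring
  rw [e3]
  exact List.map_congr_left (fun k _ => by simp [Function.comp]; ring)

theorem pyRange_rev (n : Int) :
    PySem.List.pyRange 1 n 1 = ((PySem.List.pyRange 1 n 1).reverse).map (fun j => n - j) := by
  rw [← pyRange_maprev n, List.map_map]
  have h : (PySem.List.pyRange 1 n 1).map ((fun j => n - j) ∘ (fun j => n - j))
      = (PySem.List.pyRange 1 n 1).map id :=
    List.map_congr_left (fun x _ => by simp [Function.comp])
  rw [h, List.map_id]

def updScan (p : Int → Bool) (a i : Int) : Int := if p i then i else a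

theorem foldl_updScan (p : Int → Bool) (L : List Int) (a : Int) :
    L.foldl (updScan p) a = (L.filter p).getLastD a := by
  induction L generalizing a with
  | nil => rfl
  | cons x L ih =>
    rw [List.foldl_cons, List.filter_cons]
    by_cases hx : p x = true
    · have h1 : updScan p a x = x := by unfold updScan; rw [if_pos hx]
      rw [h1, if_pos hx, ih, List.getLastD_cons]
    · have h1 : updScan p a x = a := by unfold updScan; rw [if_neg hx]
      rw [h1, if_neg hx, ih]

theorem stepA_split (name : String) (n : Int) (st : Int × Int × Int × Int) (i : Int) :
    stepA name n st i =
      (updScan (fun i => decide (PySem.Str.pyGet? name i ≠ some 'A')) st.1 i,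
       updScan (fun i => decide (PySem.Str.pyGet? name (-i) ≠ some 'A')) st.2.1 i,
       updScan (fun i => decide (PySem.Str.pyGet? name i ≠ some 'A')
                && decide (i ≤ PySem.Int.floordiv n 2)) st.2.2.1 i,
       updScan (fun i => decide (PySem.Str.pyGet? name (-i) ≠ some 'A')
                && decide (i ≤ PySem.Int.floordiv n 2)) st.2.2.2 i) := by
  obtain ⟨l, r, hl, hr⟩ := st
  simp only [stepA, updScan]
  by_cases h1 : PySem.Str.pyGet? name i ≠ some 'A' <;>
    by_cases h2 : PySem.Str.pyGet? name (-i) ≠ some 'A' <;>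
      by_cases h3 : i ≤ PySem.Int.floordiv n 2 <;>
        simp_all

theorem foldl_stepA (name : String) (n : Int) (L : List Int) (st : Int × Int × Int × Int) :
    L.foldl (stepA name n) st =
      (L.foldl (updScan (fun i => decide (PySem.Str.pyGet? name i ≠ some 'A'))) st.1,
       L.foldl (updScan (fun i => decide (PySem.Str.pyGet? name (-i) ≠ some 'A'))) st.2.1,
       L.foldl (updScan (fun i => decide (PySem.Str.pyGet? name i ≠ some 'A')
                && decide (i ≤ PySem.Int.floordiv n 2))) st.2.2.1,
       L.foldl (updScan (fun i => decide (PySem.Str.pyGet? name (-i) ≠ some 'A')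
                && decide (i ≤ PySem.Int.floordiv n 2))) st.2.2.2) := by
  induction L generalizing st with
  | nil => rfl
  | cons x L ih => simp only [List.foldl_cons, ih, stepA_split]

theorem foldl_stepA_zero (name : String) (n : Int) (L : List Int) :
    L.foldl (stepA name n) ((0, 0, 0, 0) : Int × Int × Int × Int) =
      (L.foldl (updScan (fun i => decide (PySem.Str.pyGet? name i ≠ some 'A'))) 0,
       L.foldl (updScan (fun i => decide (PySem.Str.pyGet? name (-i) ≠ some 'A'))) 0,
       L.foldl (updScan (fun i => decide (PySem.Str.pyGet? name i ≠ some 'A')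
                && decide (i ≤ PySem.Int.floordiv n 2))) 0,
       L.foldl (updScan (fun i => decide (PySem.Str.pyGet? name (-i) ≠ some 'A')
                && decide (i ≤ PySem.Int.floordiv n 2))) 0) :=
  foldl_stepA name n L (0, 0, 0, 0)

theorem vert_fun_eq :
    (fun (acc : Int) (i : Char) =>
      if i < 'N' then acc + ((i.toNat : Int) - ('A'.toNat : Int))
      else acc + (('Z'.toNat : Int) - (i.toNat : Int) + 1))
    = (fun (acc : Int) (c : Char) =>
      acc + min ((c.toNat : Int) - 65) (91 - (c.toNat : Int))) := by
  funext acc c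
  have hA : 'A'.toNat = 65 := by decide
  have hZ : 'Z'.toNat = 90 := by decide
  have hiff : c < 'N' ↔ c.toNat < 78 := by
    rw [Char.lt_def, UInt32.lt_iff_toNat_lt]
    have hN : ('N'.val).toNat = 78 := by decide
    rw [hN]
    exact Iff.rfl
  by_cases h : c < 'N'
  · have h' : c.toNat < 78 := hiff.mp h
    rw [if_pos h, hA, min_eq_left (by omega)]
    norm_num
  · have h' : 78 ≤ c.toNat := Nat.le_of_not_lt (fun hh => h (hiff.mpr hh))
    rw [if_neg h, hZ, min_eq_right (by omega)]
    omega

theorem filter_pos_le (name : String) (h : Int) :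
    (PySem.List.pyRange 1 (PySem.Str.len name) 1).filter
        (fun i => decide (PySem.Str.pyGet? name i ≠ some 'A') && decide (i ≤ h))
    = ((PySem.List.pyRange 1 (PySem.Str.len name) 1).filter
        (fun i => decide (PySem.Str.pyGet? name i ≠ some 'A'))).filter
        (fun i => decide (i ≤ h)) := by
  rw [List.filter_filter]
  exact List.filter_congr (fun x _ => by rw [Bool.and_comm])

theorem filter_neg (name : String) :
    (PySem.List.pyRange 1 (PySem.Str.len name) 1).filter
        (fun i => decide (PySem.Str.pyGet? name (-i) ≠ some 'A'))
    = (((PySem.List.pyRange 1 (PySem.Str.len name) 1).filter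
        (fun j => decide (PySem.Str.pyGet? name j ≠ some 'A'))).reverse).map
        (fun j => PySem.Str.len name - j) := by
  conv_lhs => rw [pyRange_rev (PySem.Str.len name)]
  rw [List.filter_map, List.filter_reverse]
  congr 2
  apply List.filter_congr
  intro j hj
  rw [PySem.List.mem_pyRange_one] at hj
  have hlen : PySem.Str.len name = (name.toList.length : Int) := by simp
  have hget : PySem.Str.pyGet? name (-(PySem.Str.len name - j)) = PySem.Str.pyGet? name j := by
    simp only [hlen]
    simp only [PySem.Str.pyGet?_eq, PySem.Chars.pyGet?_eq_listPyGet?]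
    exact pyGet_neg_aux name.toList j hj.1 (by omega)
  simp only [Function.comp]
  rw [hget]

theorem filter_neg_le (name : String) :
    (PySem.List.pyRange 1 (PySem.Str.len name) 1).filter
        (fun i => decide (PySem.Str.pyGet? name (-i) ≠ some 'A')
          && decide (i ≤ PySem.Int.floordiv (PySem.Str.len name) 2))
    = ((((PySem.List.pyRange 1 (PySem.Str.len name) 1).filter
        (fun j => decide (PySem.Str.pyGet? name j ≠ some 'A'))).filter
        (fun j => decide (PySem.Str.len name - PySem.Int.floordiv (PySem.Str.len name) 2 ≤ j))).reverse).map
        (fun j => PySem.Str.len name - j) := by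
  rw [List.filter_filter]
  conv_lhs => rw [pyRange_rev (PySem.Str.len name)]
  rw [List.filter_map, List.filter_reverse]
  congr 2
  apply List.filter_congr
  intro j hj
  rw [PySem.List.mem_pyRange_one] at hj
  have hlen : PySem.Str.len name = (name.toList.length : Int) := by simp
  have hget : PySem.Str.pyGet? name (-(PySem.Str.len name - j)) = PySem.Str.pyGet? name j := by
    simp only [hlen]
    simp only [PySem.Str.pyGet?_eq, PySem.Chars.pyGet?_eq_listPyGet?]
    exact pyGet_neg_aux name.toList j hj.1 (by omega)
  simp only [Function.comp]
  rw [hget, Bool.and_comm]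
  congr 1
  rw [decide_eq_decide]
  omega

-- the list of indices of non-'A' characters (the proof's common abstraction)
def idxs (M : List Char) : List Nat :=
  (List.range M.length).filter (fun j => decide (M[j]? ≠ some 'A'))

theorem mem_idxs (M : List Char) (j : Nat) :
    j ∈ idxs M ↔ j < M.length ∧ M[j]? ≠ some 'A' := by
  simp [idxs, List.mem_filter, List.mem_range]

theorem nodup_idxs (M : List Char) : (idxs M).Nodup :=
  List.Nodup.filter _ List.nodup_range

theorem pairwise_idxs (M : List Char) : (idxs M).Pairwise (· < ·) :=
  List.Pairwise.filter _ List.pairwise_lt_range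

theorem idxs_ne_nil (M : List Char) (h : idxs M ≠ []) : M ≠ [] := by
  intro hM; subst hM; exact h rfl

theorem idxs_take (M : List Char) (h : Nat) :
    idxs (M.take h) = (idxs M).filter (fun j => decide (j < h)) := by
  refine List.Perm.eq_of_pairwise (le := (· < ·))
    (fun a b _ _ h1 h2 => by omega) (pairwise_idxs _)
    (List.Pairwise.filter _ (pairwise_idxs _)) ?_
  refine (List.perm_ext_iff_of_nodup (nodup_idxs _) (List.Nodup.filter _ (nodup_idxs _))).mpr ?_
  intro a
  rw [mem_idxs, List.mem_filter, mem_idxs, List.length_take]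
  constructor
  · rintro ⟨ha, hv⟩
    have ha' : a < h := by omega
    rw [List.getElem?_take_of_lt ha'] at hv
    exact ⟨⟨by omega, hv⟩, by simpa using ha'⟩
  · rintro ⟨⟨ha, hv⟩, hh⟩
    have hh' : a < h := by simpa using hh
    rw [List.getElem?_take_of_lt hh']
    exact ⟨by omega, hv⟩

theorem rstrip_len (M : List Char) :
    (((M.reverse.dropWhile (fun c => c == 'A')).length : Nat) : Int)
      = ((idxs M).map (fun (j : Nat) => (j : Int) + 1)).getLastD 0 := by
  induction M using List.reverseRecOn with
  | nil => rfl
  | append_singleton M c ih =>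
    have hidx : idxs (M ++ [c])
        = idxs M ++ List.filter (fun j => decide ((M ++ [c])[j]? ≠ some 'A')) [M.length] := by
      unfold idxs
      rw [List.length_append, List.length_singleton, List.range_succ, List.filter_append]
      congr 1
      apply List.filter_congr
      intro j hj
      rw [List.mem_range] at hj
      rw [List.getElem?_append_left hj]
    rw [List.reverse_append, List.reverse_singleton, List.singleton_append]
    by_cases hc : c = 'A'
    · subst hc
      rw [List.dropWhile_cons_of_pos (by decide), hidx]
      have hnil : List.filter (fun j => decide ((M ++ ['A'])[j]? ≠ some 'A')) [M.length] = [] := by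
        simp
      rw [hnil, List.append_nil]
      exact ih
    · rw [List.dropWhile_cons_of_neg (by simp [hc]), hidx]
      have hone : List.filter (fun j => decide ((M ++ [c])[j]? ≠ some 'A')) [M.length] = [M.length] := by
        simp [hc]
      rw [hone, List.map_append]
      simp

theorem lstrip_len (M : List Char) :
    (((M.dropWhile (fun c => c == 'A')).length : Nat) : Int)
      = (M.length : Int) - (((idxs M).headD M.length : Nat) : Int) := by
  induction M with
  | nil => simp [idxs]
  | cons c M ih =>
    have hf : List.filter ((fun j => decide ((c :: M)[j]? ≠ some 'A')) ∘ Nat.succ)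
        (List.range M.length) = idxs M := by
      unfold idxs
      apply List.filter_congr
      intro j _
      simp [Function.comp]
    have hidx : idxs (c :: M)
        = (if decide ((c :: M)[0]? ≠ some 'A') = true then [0] else [])
            ++ (idxs M).map Nat.succ := by
      unfold idxs
      rw [List.length_cons, List.range_succ_eq_map, List.filter_cons, List.filter_map, hf]
      split_ifs <;> simp [idxs]
    by_cases hc : c = 'A'
    · subst hc
      have h0 : ((('A' : Char) :: M)[0]? = some 'A') := rfl
      rw [List.dropWhile_cons_of_pos (by decide)]
      rw [hidx]
      simp only [h0, ne_eq, not_true_eq_false, decide_false, Bool.false_eq_true,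
        if_false, List.nil_append]
      cases hF : idxs M with
      | nil =>
        rw [hF] at ih
        simp at ih ⊢
        omega
      | cons j F' =>
        rw [hF] at ih
        simp at ih ⊢
        omega
    · rw [List.dropWhile_cons_of_neg (by simp [hc]), hidx]
      have h0 : decide (((c : Char) :: M)[0]? ≠ some 'A') = true := by simp [hc]
      rw [h0]
      simp

theorem idxs_drop (M : List Char) (s : Nat) :
    idxs (M.drop s) = ((idxs M).filter (fun j => decide (s ≤ j))).map (fun j => j - s) := by
  have hpw : (((idxs M).filter (fun j => decide (s ≤ j))).map (fun j => j - s)).Pairwise (· < ·) := by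
    rw [List.pairwise_map]
    refine List.Pairwise.imp_of_mem (fun {a b} ha hb hab => ?_)
      (List.Pairwise.filter _ (pairwise_idxs M))
    have hsa : s ≤ a := by simpa using (List.of_mem_filter ha)
    omega
  have hnd : (((idxs M).filter (fun j => decide (s ≤ j))).map (fun j => j - s)).Nodup := by
    refine List.Nodup.map_on ?_ (List.Nodup.filter _ (nodup_idxs M))
    intro x hx y hy hxy
    have hxs : s ≤ x := by simpa using (List.of_mem_filter hx)
    have hys : s ≤ y := by simpa using (List.of_mem_filter hy)
    omega
  refine List.Perm.eq_of_pairwise (le := (· < ·)) (fun a b _ _ h1 h2 => by omega)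
    (pairwise_idxs _) hpw ?_
  refine (List.perm_ext_iff_of_nodup (nodup_idxs _) hnd).mpr ?_
  intro a
  rw [mem_idxs, List.mem_map]
  constructor
  · rintro ⟨ha, hv⟩
    rw [List.length_drop] at ha
    rw [List.getElem?_drop] at hv
    refine ⟨s + a, ?_, by omega⟩
    rw [List.mem_filter, mem_idxs]
    exact ⟨⟨by omega, hv⟩, by simp⟩
  · rintro ⟨j, hj, hja⟩
    rw [List.mem_filter, mem_idxs] at hj
    obtain ⟨⟨hjm, hv⟩, hsj⟩ := hj
    have hsj' : s ≤ j := by simpa using hsj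
    rw [List.length_drop, List.getElem?_drop]
    have hj' : s + a = j := by omega
    rw [hj']
    exact ⟨by omega, hv⟩

theorem P_eq (name : String) :
    (PySem.List.pyRange 1 (PySem.Str.len name) 1).filter
        (fun i => decide (PySem.Str.pyGet? name i ≠ some 'A'))
      = (idxs name.toList.tail).map (fun (j : Nat) => (j : Int) + 1) := by
  rw [PySem.List.pyRange_one, List.filter_map]
  have hlen : PySem.Str.len name = (name.toList.length : Int) := by simp
  have hlen2 : (PySem.Str.len name - 1).toNat = name.toList.tail.length := by
    rw [hlen, List.length_tail]; omega
  rw [hlen2]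
  have hf : ∀ j ∈ List.range name.toList.tail.length,
      ((fun i => decide (PySem.Str.pyGet? name i ≠ some 'A')) ∘ (fun k : Nat => (1 : Int) + ↑k)) j
        = (fun j => decide (name.toList.tail[j]? ≠ some 'A')) j := by
    intro j _
    simp only [Function.comp]
    congr 1
    simp only [PySem.Str.pyGet?_eq, PySem.Chars.pyGet?_eq_listPyGet?]
    rw [PySem.List.pyGet?_of_nonneg name.toList (by omega : (0:Int) ≤ 1 + ↑j)]
    have ht : ((1 : Int) + ↑j).toNat = j + 1 := by omega
    rw [ht, ← List.getElem?_tail]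
  rw [List.filter_congr hf]
  unfold idxs
  exact List.map_congr_left (fun x _ => by omega)

-- getLastD of the reversed, (N - ·)-mapped, (+1)-shifted index list is a head read
theorem rev_map_getLastD (F : List Nat) (ml : Nat) (N : Int) (hN : F ≠ [] → N = (ml : Int) + 1) :
    ((F.map (fun (j : Nat) => (j : Int) + 1)).reverse.map (fun j => N - j)).getLastD 0
      = (ml : Int) - ((F.headD ml : Nat) : Int) := by
  cases F with
  | nil => simp
  | cons j F' =>
    rw [hN (by simp)]
    simp [List.getLastD_eq_getLast?, List.getLast?_reverse, List.head?_map]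

theorem length_rstripA (cs : List Char) :
    (rstripA cs).length = (cs.reverse.dropWhile (fun c => c == 'A')).length := by
  simp [rstripA]

-- ===== VERDICT (by name: the statement is the Claim_ definition above) =====
theorem solution_spec : Claim_equal_solution := by
  intro name _
  unfold Spec_solution
  simp only [solution, solution_alt]
  rw [vert_fun_eq, foldl_stepA_zero]
  simp only [foldl_updScan]
  rw [filter_neg name, filter_neg_le name, filter_pos_le name, P_eq name]
  simp only [PySem.List.slice_from_one]
  have hlen : PySem.Str.len name = (name.toList.length : Int) := by simp
  have hhalf : PySem.Int.floordiv (PySem.Str.len name) 2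
      = ((name.toList.length / 2 : Nat) : Int) := by
    rw [hlen]; exact_mod_cast PySem.Int.floordiv_natCast name.toList.length 2
  have hhalf' : PySem.Int.floordiv ((name.toList.length : Nat) : Int) 2
      = ((name.toList.length / 2 : Nat) : Int) := by
    exact_mod_cast PySem.Int.floordiv_natCast name.toList.length 2
  -- the two remaining slices are a take and a drop
  have hsl : PySem.List.slice name.toList (some 1)
        (some (PySem.Int.floordiv (PySem.Str.len name) 2 + 1))
      = name.toList.tail.take (name.toList.length / 2) := by
    rw [hhalf]
    have h1 : (1 : Int) = ((1 : Nat) : Int) := by norm_num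
    have h2 : ((name.toList.length / 2 : Nat) : Int) + 1
        = ((name.toList.length / 2 + 1 : Nat) : Int) := by push_cast; ring
    rw [h2, h1, PySem.List.slice_natCast, Nat.add_sub_cancel, List.drop_one]
  have hsr : PySem.List.slice name.toList
        (some (PySem.Str.len name - PySem.Int.floordiv (PySem.Str.len name) 2)) none
      = name.toList.drop (name.toList.length - name.toList.length / 2) := by
    rw [hhalf, hlen]
    have h3 : (name.toList.length : Int) - ((name.toList.length / 2 : Nat) : Int)
        = ((name.toList.length - name.toList.length / 2 : Nat) : Int) := by omega
    rw [h3, PySem.List.slice_from_natCast]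
  rw [hsl, hsr]
  -- the four horizontal quantities agree
  have e1 : (((rstripA name.toList.tail).length : Nat) : Int)
      = ((idxs name.toList.tail).map (fun (j : Nat) => (j : Int) + 1)).getLastD 0 := by
    rw [length_rstripA]; exact rstrip_len _
  have e2 : (((lstripA name.toList.tail).length : Nat) : Int)
      = (((idxs name.toList.tail).map (fun (j : Nat) => (j : Int) + 1)).reverse.map
          (fun j => PySem.Str.len name - j)).getLastD 0 := by
    rw [show (lstripA name.toList.tail).length
        = (name.toList.tail.dropWhile (fun c => c == 'A')).length from rfl]
    rw [lstrip_len, rev_map_getLastD _ name.toList.tail.length _ ?hN]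
    case hN =>
      intro hF
      have hne := idxs_ne_nil _ hF
      have hl1 : name.toList.length = name.toList.tail.length + 1 := by
        cases hL : name.toList with
        | nil => rw [hL] at hne; exact absurd rfl hne
        | cons a l => simp
      rw [hlen, hl1]; push_cast; ring
  have e3 : (((rstripA (name.toList.tail.take (name.toList.length / 2))).length : Nat) : Int)
      = (((idxs name.toList.tail).map (fun (j : Nat) => (j : Int) + 1)).filter
          (fun i => decide (i ≤ PySem.Int.floordiv (PySem.Str.len name) 2))).getLastD 0 := by
    rw [length_rstripA, rstrip_len, idxs_take, List.filter_map]
    congr 2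
    apply List.filter_congr
    intro j _
    simp only [Function.comp, hlen, hhalf']
    rw [decide_eq_decide]
    omega
  have e4 : (((lstripA (name.toList.drop
          (name.toList.length - name.toList.length / 2))).length : Nat) : Int)
      = ((((idxs name.toList.tail).map (fun (j : Nat) => (j : Int) + 1)).filter
            (fun j => decide (PySem.Str.len name
              - PySem.Int.floordiv (PySem.Str.len name) 2 ≤ j))).reverse.map
          (fun j => PySem.Str.len name - j)).getLastD 0 := by
    have hA : ((idxs name.toList.tail).map (fun (j : Nat) => (j : Int) + 1)).filter
          (fun j => decide (PySem.Str.len name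
            - PySem.Int.floordiv (PySem.Str.len name) 2 ≤ j))
        = ((idxs name.toList.tail).filter
            (fun j => decide (name.toList.length - name.toList.length / 2 - 1 ≤ j))).map
            (fun (j : Nat) => (j : Int) + 1) := by
      rw [List.filter_map]
      congr 1
      apply List.filter_congr
      intro j _
      simp only [Function.comp, hlen, hhalf']
      rw [decide_eq_decide]
      omega
    rw [hA]
    have hdrop : name.toList.drop (name.toList.length - name.toList.length / 2)
        = name.toList.tail.drop (name.toList.length - name.toList.length / 2 - 1) := by
      rw [← List.drop_one, List.drop_drop]
      by_cases hL : name.toList = []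
      · simp [hL]
      · have hm1 : 1 ≤ name.toList.length := by
          cases hc : name.toList with
          | nil => exact absurd hc hL
          | cons a l => simp
        congr 1
        omega
    rw [hdrop]
    rw [show (lstripA (name.toList.tail.drop
          (name.toList.length - name.toList.length / 2 - 1))).length
        = ((name.toList.tail.drop
            (name.toList.length - name.toList.length / 2 - 1)).dropWhile
              (fun c => c == 'A')).length from rfl]
    rw [lstrip_len, idxs_drop]
    cases hQ : (idxs name.toList.tail).filter
        (fun j => decide (name.toList.length - name.toList.length / 2 - 1 ≤ j)) with
    | nil => simp
    | cons j Q' =>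
      have hjm : j ∈ (idxs name.toList.tail).filter
          (fun j => decide (name.toList.length - name.toList.length / 2 - 1 ≤ j)) := by
        rw [hQ]; exact List.mem_cons_self
      rw [List.mem_filter, mem_idxs] at hjm
      obtain ⟨⟨hj1, _⟩, hj2⟩ := hjm
      have hj2' : name.toList.length - name.toList.length / 2 - 1 ≤ j := by simpa using hj2
      have hne : name.toList ≠ [] := by
        intro h0
        rw [h0] at hj1
        simp at hj1
      have hl1 : name.toList.length = name.toList.tail.length + 1 := by
        cases hL : name.toList with
        | nil => exact absurd hL hne
        | cons a l => simp
      simp only [List.map_cons, List.headD_cons, List.length_drop,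
        List.getLastD_eq_getLast?, List.getLast?_map, List.getLast?_reverse,
        List.head?_cons, Option.map_some, Option.getD_some, hlen]
      have hj3 : j < name.toList.tail.length := hj1
      omega
  rw [e1, e2, e3, e4]
  omega
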